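-- pv_equiv track=rewrite | github.com/KavinduDr/freecodecamp-daily-challenges | challenge_38/slug-generator.py | generate_slug
-- ===== SOURCE A (Python) =====
-- def generate_slug(string):
--     slug = []
--     i = 0
--     length = len(string)
--
--     while i < length:
--         char = string[i]
--         if char.isalnum():
--             slug.append(char.lower())
--             i += 1
--         elif char == ' ':
--             # Only add %20 if the last added wasn't %20
--             if not slug or slug[-1] != '%20':
--                 slug.append('%20')
--             i += 1
--         else:
--             # Skip other non-alphanumeric characters
--             i += 1
--     return ''.join(slug).strip('%20')
-- ===== SOURCE B (Python) =====
-- def generate_slug(string):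
--     words = []
--     current = []
--     for char in string:
--         if char.isalnum():
--             current.append(char.lower())
--         elif char == ' ':
--             if current:
--                 words.append(''.join(current))
--                 current = []
--     if current:
--         words.append(''.join(current))
--     return '%20'.join(words).strip('%20')
-- ===== Notes on version B (the rewrite author's own statement) =====
-- stated objective: simpler
-- what changed: B replaces A's flat token-emission with inline '%20' de-duplication (append the separator unless the last token already is one) by a word-buffer pass that collects lowercased words and joins them once with the separator, keeping the final strip; fewer list operations per character make it measurably faster.
import Mathlib
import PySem

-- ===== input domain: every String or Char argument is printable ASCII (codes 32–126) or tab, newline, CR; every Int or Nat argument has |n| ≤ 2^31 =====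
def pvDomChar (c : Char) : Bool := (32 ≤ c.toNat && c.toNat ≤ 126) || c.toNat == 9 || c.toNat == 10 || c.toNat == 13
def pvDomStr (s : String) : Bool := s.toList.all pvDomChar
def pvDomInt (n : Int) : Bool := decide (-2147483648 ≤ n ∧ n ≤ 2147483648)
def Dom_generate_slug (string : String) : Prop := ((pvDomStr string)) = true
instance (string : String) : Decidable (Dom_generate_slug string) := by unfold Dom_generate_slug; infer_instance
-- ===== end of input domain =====

-- B replaces A's flat token list with inline %20 de-duplication by a word-buffer pass
-- (collect lowercased words, join with '%20'); objective: simpler. Return value only, no mutation.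

-- ===== PORT A =====
-- while i < length over string[i], accumulating the token list `slug`
def genA_loop : List Char → List String → List String
  | [], slug => slug
  | c :: rest, slug =>
    if PySem.Chars.isalnum c then
      genA_loop rest (slug ++ [String.ofList [PySem.Chars.lowerChar c]])
    else if c = ' ' then
      if slug = [] ∨ PySem.List.pyGetD slug (-1) "" ≠ "%20" then
        genA_loop rest (slug ++ ["%20"])
      else genA_loop rest slug
    else genA_loop rest slug

def generate_slug (string : String) : String :=
  PySem.Str.stripChars (PySem.Str.join "" (genA_loop string.toList [])) "%20"

-- ===== PORT B =====
-- for char in string, accumulating (words, current)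
def genB_loop : List Char → List String → List Char → List String × List Char
  | [], words, current => (words, current)
  | c :: rest, words, current =>
    if PySem.Chars.isalnum c then
      genB_loop rest words (current ++ [PySem.Chars.lowerChar c])
    else if c = ' ' then
      if current ≠ [] then genB_loop rest (words ++ [String.ofList current]) []
      else genB_loop rest words current
    else genB_loop rest words current

def generate_slug_alt (string : String) : String :=
  let p := genB_loop string.toList [] []
  let words := if p.2 ≠ [] then p.1 ++ [String.ofList p.2] else p.1
  PySem.Str.stripChars (PySem.Str.join "%20" words) "%20"

-- ===== PRECONDITION & SPEC =====
def Spec_generate_slug (string : String) (out : String) : Prop := out = generate_slug_alt string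
instance (string : String) (out : String) : Decidable (Spec_generate_slug string out) := by unfold Spec_generate_slug; infer_instance

-- ===== CLAIM (what is proved, stated in full; the proofs are below) =====
def Claim_equal_generate_slug : Prop := ∀ (string : String), Dom_generate_slug string → Spec_generate_slug string (generate_slug string)

-- ===== LEMMAS AND PROOFS =====

-- the three stripped characters, "%20".toList
def S20 : List Char := ['%', '2', '0']

-- A's emitted characters, given b = "the last token appended was '%20'"
def Fem (b : Bool) : List Char → List Char
  | [] => []
  | c :: cs =>
    if PySem.Chars.isalnum c then PySem.Chars.lowerChar c :: Fem false cs
    else if c = ' ' then (if b then Fem true cs else S20 ++ Fem true cs)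
    else Fem b cs

-- B's word splitter with the running buffer `cur`
def Wl : List Char → List Char → List (List Char)
  | [], cur => if cur ≠ [] then [cur] else []
  | c :: cs, cur =>
    if PySem.Chars.isalnum c then Wl cs (cur ++ [PySem.Chars.lowerChar c])
    else if c = ' ' then (if cur ≠ [] then cur :: Wl cs [] else Wl cs [])
    else Wl cs cur

def hasAl (cs : List Char) : Bool := cs.any PySem.Chars.isalnum

-- some space occurs before the first alphanumeric character
def padL : List Char → Bool
  | [] => false
  | c :: cs => if PySem.Chars.isalnum c then false else if c = ' ' then true else padL cs

-- some space occurs with no alphanumeric character after it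
def padR' : List Char → Bool
  | [] => false
  | c :: cs =>
    if PySem.Chars.isalnum c then padR' cs
    else if c = ' ' then (!hasAl cs || padR' cs)
    else padR' cs

-- same, but spaces seen before any alphanumeric character do not count
def padR : List Char → Bool
  | [] => false
  | c :: cs => if PySem.Chars.isalnum c then padR' cs else padR cs

def padIf (b : Bool) : List Char := if b then S20 else []

def interW (L : List (List Char)) : List Char := PySem.Chars.join S20 L

def l20 (slug : List String) : Bool := slug.getLast? == some "%20"


theorem isal_space : PySem.Chars.isalnum ' ' = false := by decide

-- ''.join over an appended token
theorem join_nil_concat (M : List (List Char)) (x : List Char) :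
    PySem.Chars.join [] (M ++ [x]) = PySem.Chars.join [] M ++ x := by
  induction M with
  | nil => simp [PySem.Chars.join_singleton]
  | cons m M ih =>
    cases M with
    | nil => simp [PySem.Chars.join_singleton, PySem.Chars.join_cons_cons]
    | cons q Q =>
      simp only [List.cons_append, PySem.Chars.join_cons_cons]
      simp [List.append_assoc]
      exact ih

theorem interW_cons (cur : List Char) (L : List (List Char)) (h : L ≠ []) :
    interW (cur :: L) = cur ++ S20 ++ interW L := by
  cases L with
  | nil => exact absurd rfl h
  | cons q Q => simp [interW, PySem.Chars.join_cons_cons]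

theorem ofList_single_ne (c : Char) : String.ofList [c] ≠ "%20" := by
  intro h
  have h2 := congrArg String.toList h
  rw [String.toList_ofList] at h2
  simp at h2

theorem l20_concat (slug : List String) (t : String) : l20 (slug ++ [t]) = (t == "%20") := by
  simp [l20]

theorem condA (slug : List String) :
    (slug = [] ∨ PySem.List.pyGetD slug (-1) "" ≠ "%20") ↔ l20 slug = false := by
  rcases List.eq_nil_or_concat slug with rfl | ⟨L, b, rfl⟩
  · simp [l20]
  · rw [List.concat_eq_append, PySem.List.pyGetD_neg_one_append_singleton, l20_concat]
    simp

-- A's loop emits Fem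
theorem genA_join (cs : List Char) (slug : List String) :
    PySem.Chars.join [] ((genA_loop cs slug).map String.toList) =
      PySem.Chars.join [] (slug.map String.toList) ++ Fem (l20 slug) cs := by
  induction cs generalizing slug with
  | nil => simp [genA_loop, Fem]
  | cons c cs ih =>
    by_cases hal : PySem.Chars.isalnum c = true
    · rw [show genA_loop (c :: cs) slug =
          genA_loop cs (slug ++ [String.ofList [PySem.Chars.lowerChar c]]) by
            simp [genA_loop, hal]]
      rw [ih]
      simp only [List.map_append, List.map_cons, List.map_nil]
      rw [join_nil_concat, l20_concat, String.toList_ofList]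
      rw [show (String.ofList [PySem.Chars.lowerChar c] == "%20") = false by
        simp [ofList_single_ne]]
      simp [Fem, hal, List.append_assoc]
    · by_cases hsp : c = ' '
      · subst hsp
        by_cases hc : (slug = [] ∨ PySem.List.pyGetD slug (-1) "" ≠ "%20")
        · have hb : l20 slug = false := (condA slug).mp hc
          rw [show genA_loop (' ' :: cs) slug = genA_loop cs (slug ++ ["%20"]) by
            simp [genA_loop, hal, hc]]
          rw [ih]
          simp only [List.map_append, List.map_cons, List.map_nil]
          rw [join_nil_concat, l20_concat]
          rw [show (("%20" : String) == "%20") = true from rfl]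
          rw [hb]
          simp [Fem, hal, List.append_assoc]
          rfl
        · have hb : l20 slug = true := by
            by_contra hfalse
            exact hc ((condA slug).mpr (by simpa using hfalse))
          rw [show genA_loop (' ' :: cs) slug = genA_loop cs slug by
            simp [genA_loop, hal, hc]]
          rw [ih, hb]
          simp [Fem, hal]
      · rw [show genA_loop (c :: cs) slug = genA_loop cs slug by
          simp [genA_loop, hal, hsp]]
        rw [ih]
        simp [Fem, hal, hsp]

-- B's loop computes Wl
theorem genB_fin (cs : List Char) (words : List String) (cur : List Char) :
    (if (genB_loop cs words cur).2 ≠ [] then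
        (genB_loop cs words cur).1 ++ [String.ofList (genB_loop cs words cur).2]
      else (genB_loop cs words cur).1) = words ++ (Wl cs cur).map String.ofList := by
  induction cs generalizing words cur with
  | nil =>
    by_cases h : cur = [] <;> simp [genB_loop, Wl, h]
  | cons c cs ih =>
    by_cases hal : PySem.Chars.isalnum c = true
    · have e1 : genB_loop (c :: cs) words cur =
          genB_loop cs words (cur ++ [PySem.Chars.lowerChar c]) := by simp [genB_loop, hal]
      have e2 : Wl (c :: cs) cur = Wl cs (cur ++ [PySem.Chars.lowerChar c]) := by simp [Wl, hal]
      rw [e1, e2, ih]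
    · by_cases hsp : c = ' '
      · subst hsp
        by_cases hc : cur = []
        · have e1 : genB_loop (' ' :: cs) words cur = genB_loop cs words cur := by
            simp [genB_loop, hal, hc]
          have e2 : Wl (' ' :: cs) cur = Wl cs cur := by simp [Wl, hal, hc]
          rw [e1, e2, ih]
        · have e1 : genB_loop (' ' :: cs) words cur =
              genB_loop cs (words ++ [String.ofList cur]) [] := by simp [genB_loop, hal, hc]
          have e2 : Wl (' ' :: cs) cur = cur :: Wl cs [] := by simp [Wl, hal, hc]
          rw [e1, e2, ih]
          simp
      · have e1 : genB_loop (c :: cs) words cur = genB_loop cs words cur := by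
          simp [genB_loop, hal, hsp]
        have e2 : Wl (c :: cs) cur = Wl cs cur := by simp [Wl, hal, hsp]
        rw [e1, e2, ih]

theorem W_ne (cs : List Char) (cur : List Char) (h : cur ≠ []) : Wl cs cur ≠ [] := by
  induction cs generalizing cur with
  | nil => simp [Wl, h]
  | cons c cs ih =>
    by_cases hal : PySem.Chars.isalnum c = true
    · simpa [Wl, hal] using ih (cur ++ [PySem.Chars.lowerChar c]) (by simp)
    · by_cases hsp : c = ' '
      · subst hsp
        simp [Wl, hal, h]
      · simpa [Wl, hal, hsp] using ih cur h

theorem W_noal (cs : List Char) (h : hasAl cs = false) : Wl cs [] = [] := by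
  induction cs with
  | nil => simp [Wl]
  | cons c cs ih =>
    simp only [hasAl, List.any_cons, Bool.or_eq_false_iff] at h
    by_cases hsp : c = ' ' <;> simp [Wl, h.1, hsp, isal_space, ih (by simp [hasAl, h.2])]

theorem W_al (cs : List Char) (h : hasAl cs = true) : Wl cs [] ≠ [] := by
  induction cs with
  | nil => simp [hasAl] at h
  | cons c cs ih =>
    by_cases hal : PySem.Chars.isalnum c = true
    · simpa [Wl, hal] using W_ne cs [PySem.Chars.lowerChar c] (by simp)
    · have h2 : hasAl cs = true := by
        simp only [hasAl, List.any_cons, hal] at h ⊢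
        simpa using h
      by_cases hsp : c = ' ' <;> simpa [Wl, hal, hsp] using ih h2

theorem padR_eq (cs : List Char) (h : hasAl cs = true) : padR cs = padR' cs := by
  induction cs with
  | nil => rfl
  | cons c cs ih =>
    by_cases hal : PySem.Chars.isalnum c = true
    · simp [padR, padR', hal]
    · have h2 : hasAl cs = true := by
        simp only [hasAl, List.any_cons, hal] at h ⊢
        simpa using h
      by_cases hsp : c = ' ' <;> simp [padR, padR', hal, hsp, h2, ih h2]

theorem Fem_noal (cs : List Char) (h : hasAl cs = false) : Fem true cs = [] := by
  induction cs with
  | nil => rfl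
  | cons c cs ih =>
    simp only [hasAl, List.any_cons, Bool.or_eq_false_iff] at h
    by_cases hsp : c = ' ' <;> simp [Fem, h.1, hsp, isal_space, ih (by simp [hasAl, h.2])]

theorem chr (cs : List Char) :
    (Fem true cs = interW (Wl cs []) ++ padIf (padR cs)) ∧
    (∀ cur, cur ≠ [] → interW (Wl cs cur) ++ padIf (padR' cs) = cur ++ Fem false cs) := by
  induction cs with
  | nil =>
    constructor
    · simp [Fem, Wl, interW, PySem.Chars.join_nil, padR, padIf]
    · intro cur h
      simp [Fem, Wl, h, interW, PySem.Chars.join_singleton, padR', padIf]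
  | cons c cs ih =>
    obtain ⟨ih1, ih3⟩ := ih
    constructor
    · by_cases hal : PySem.Chars.isalnum c = true
      · have := ih3 [PySem.Chars.lowerChar c] (by simp)
        simp only [Fem, Wl, padR, hal, if_true, List.nil_append]
        rw [this]
        rfl
      · by_cases hsp : c = ' ' <;>
          simpa [Fem, Wl, padR, hal, hsp] using ih1
    · intro cur hcur
      by_cases hal : PySem.Chars.isalnum c = true
      · have := ih3 (cur ++ [PySem.Chars.lowerChar c]) (by simp)
        simp only [Fem, Wl, padR', hal, if_true]
        rw [this]
        simp
      · by_cases hsp : c = ' '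
        · subst hsp
          by_cases hA : hasAl cs = true
          · have hW : Wl cs [] ≠ [] := W_al cs hA
            have e2 : Wl (' ' :: cs) cur = cur :: Wl cs [] := by simp [Wl, hcur, isal_space]
            have e3 : padR' (' ' :: cs) = padR' cs := by simp [padR', isal_space, hA]
            have e4 : Fem false (' ' :: cs) = S20 ++ Fem true cs := by simp [Fem, isal_space]
            rw [e2, e3, e4, interW_cons cur (Wl cs []) hW, ih1, padR_eq cs hA]
            simp [List.append_assoc]
          · have hA' : hasAl cs = false := by simpa using hA
            have e2 : Wl (' ' :: cs) cur = cur :: Wl cs [] := by simp [Wl, hcur, isal_space]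
            have e3 : padR' (' ' :: cs) = true := by simp [padR', isal_space, hA']
            have e4 : Fem false (' ' :: cs) = S20 ++ Fem true cs := by simp [Fem, isal_space]
            rw [e2, e3, e4, W_noal cs hA', Fem_noal cs hA']
            simp [interW, PySem.Chars.join_singleton, padIf]
        · simp only [Wl, padR', Fem, hal, hsp, if_false]
          exact ih3 cur hcur

theorem chr2 (cs : List Char) : Fem false cs = padIf (padL cs) ++ Fem true cs := by
  induction cs with
  | nil => rfl
  | cons c cs ih =>
    by_cases hal : PySem.Chars.isalnum c = true
    · simp [Fem, padL, hal, padIf]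
    · by_cases hsp : c = ' '
      · simp [Fem, padL, hsp, isal_space, padIf]
      · simp [Fem, padL, hal, hsp, ih]

def P20 (c : Char) : Bool := S20.contains c

theorem drop_pad (b : Bool) (x : List Char) :
    List.dropWhile P20 (padIf b ++ x) = List.dropWhile P20 x := by
  cases b <;> simp [padIf, S20, P20]

theorem drop_pad_rev (b : Bool) (x : List Char) :
    List.dropWhile P20 ((padIf b).reverse ++ x) = List.dropWhile P20 x := by
  cases b <;> simp [padIf, S20, P20]

theorem strip_pad (a b : Bool) (core : List Char) :
    PySem.Chars.stripChars (padIf a ++ core ++ padIf b) S20 =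
      PySem.Chars.stripChars core S20 := by
  show (List.dropWhile P20 (List.dropWhile P20 (padIf a ++ core ++ padIf b)).reverse).reverse =
    (List.dropWhile P20 (List.dropWhile P20 core).reverse).reverse
  rw [List.append_assoc, drop_pad, List.dropWhile_append]
  by_cases h : (List.dropWhile P20 core).isEmpty = true
  · rw [if_pos h]
    rw [List.isEmpty_iff] at h
    rw [h]
    cases b <;> simp [padIf, S20, P20]
  · rw [if_neg h]
    rw [List.reverse_append, drop_pad_rev]

theorem generate_slug_spec : Claim_equal_generate_slug := by
  unfold Claim_equal_generate_slug Spec_generate_slug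
  intro s _
  apply String.toList_inj.mp
  have hA : (generate_slug s).toList =
      PySem.Chars.stripChars
        (padIf (padL s.toList) ++ (interW (Wl s.toList []) ++ padIf (padR s.toList))) S20 := by
    unfold generate_slug
    rw [PySem.Str.toList_stripChars, PySem.Str.toList_join]
    rw [show ("%20" : String).toList = S20 from rfl, show ("" : String).toList = ([] : List Char) from rfl]
    rw [genA_join s.toList []]
    rw [show l20 [] = false from rfl]
    simp only [List.map_nil, PySem.Chars.join_nil, List.nil_append]
    rw [chr2, (chr s.toList).1]
  have hB : (generate_slug_alt s).toList =
      PySem.Chars.stripChars (interW (Wl s.toList [])) S20 := by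
    unfold generate_slug_alt
    simp only []
    rw [PySem.Str.toList_stripChars, PySem.Str.toList_join]
    rw [show ("%20" : String).toList = S20 from rfl]
    rw [genB_fin s.toList [] []]
    simp only [List.nil_append, List.map_map]
    rw [show String.toList ∘ String.ofList = id from funext fun l => String.toList_ofList]
    rw [List.map_id]
    rfl
  rw [hA, hB, ← List.append_assoc, strip_pad]
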